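-- pv_equiv track=rewrite | github.com/ajmdroid/v1g2_simple | tools/replay_ble.py | deduplicate_packets
-- ===== SOURCE A (Python) =====
-- def deduplicate_packets(packets: list) -> list:
--     """Remove duplicate packets at same timestamp."""
--     seen = set()
--     unique = []
--
--     for pkt in packets:
--         key = (pkt["ts"], pkt["hex"])
--         if key not in seen:
--             seen.add(key)
--             unique.append(pkt)
--
--     return sorted(unique, key=lambda p: p["ts"])
-- ===== SOURCE B (Python) =====
-- def deduplicate_packets(packets: list) -> list:
--     """Remove duplicate packets at same timestamp."""
--     ordered = sorted(packets, key=lambda p: p["ts"])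
--     index = {}
--     for p in ordered:
--         index.setdefault((p["ts"], p["hex"]), p)
--     return list(index.values())
-- ===== Notes on version B (the rewrite author's own statement) =====
-- stated objective: alternative
-- what changed: B reverses the two phases and changes the dedup mechanism: it stably sorts all packets by ts first, then deduplicates in one pass with dict.setdefault keyed by (ts,hex) (returning the dict's values), instead of A's seen-set/append dedup followed by a sort of the survivors; equal output because the sort is stable and equal (ts,hex) keys share a ts.
import Mathlib
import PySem

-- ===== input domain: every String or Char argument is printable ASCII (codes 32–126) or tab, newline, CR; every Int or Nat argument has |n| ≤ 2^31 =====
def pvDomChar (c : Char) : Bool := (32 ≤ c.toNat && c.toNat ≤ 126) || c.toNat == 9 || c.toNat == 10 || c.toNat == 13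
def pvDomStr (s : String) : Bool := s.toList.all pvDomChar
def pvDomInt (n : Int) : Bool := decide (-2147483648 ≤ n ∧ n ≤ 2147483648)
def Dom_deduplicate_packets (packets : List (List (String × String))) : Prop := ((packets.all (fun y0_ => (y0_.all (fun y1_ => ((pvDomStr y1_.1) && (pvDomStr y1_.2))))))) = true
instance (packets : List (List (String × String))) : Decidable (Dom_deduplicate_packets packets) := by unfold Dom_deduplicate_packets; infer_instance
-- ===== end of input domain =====

-- B sorts the whole input stably by ts first, then deduplicates in one pass with a dict keyed by
-- (ts,hex) via setdefault, instead of A's seen-set dedup followed by sorting the survivors.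
-- Same algorithmic cost as A (no speed claim); equal output by sort stability.

-- ===== PORT A =====
def deduplicate_packets (packets : List (List (String × String))) : List (List (String × String)) :=
  -- seen = set(); unique = []; for pkt in packets: key = (pkt["ts"], pkt["hex"]); if key not in seen: seen.add(key); unique.append(pkt)
  let st := packets.foldl
    (fun (st : PySem.Set (String × String) × List (List (String × String))) pkt =>
      let key := (PySem.Dict.getD ⟨pkt⟩ "ts" "", PySem.Dict.getD ⟨pkt⟩ "hex" "")
      if !(PySem.Set.contains st.1 key) then (PySem.Set.add st.1 key, st.2 ++ [pkt]) else st)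
    (PySem.Set.empty, [])
  PySem.List.sorted st.2 (fun p => PySem.Dict.getD ⟨p⟩ "ts" "") false

-- ===== PORT B =====
def deduplicate_packets_alt (packets : List (List (String × String))) : List (List (String × String)) :=
  let ordered := PySem.List.sorted packets (fun p => PySem.Dict.getD ⟨p⟩ "ts" "") false
  let index := ordered.foldl
    (fun (d : PySem.Dict (String × String) (List (String × String))) p =>
      d.setdefault (PySem.Dict.getD ⟨p⟩ "ts" "", PySem.Dict.getD ⟨p⟩ "hex" "") p)
    PySem.Dict.empty
  index.values

-- ===== PRECONDITION & SPEC =====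
-- Pre_ excludes exactly the packets missing a "ts" or "hex" key, on which Python A raises KeyError.
def Pre_deduplicate_packets (packets : List (List (String × String))) : Prop :=
  ∀ pkt ∈ packets, (PySem.Dict.get? (⟨pkt⟩ : PySem.Dict String String) "ts").isSome ∧
    (PySem.Dict.get? (⟨pkt⟩ : PySem.Dict String String) "hex").isSome
instance (packets : List (List (String × String))) : Decidable (Pre_deduplicate_packets packets) := by
  unfold Pre_deduplicate_packets; infer_instance
def pvWitness_deduplicate_packets : (List (List (String × String))) :=
  [[("ts", "2"), ("hex", "aa")], [("ts", "1"), ("hex", "bb")], [("ts", "2"), ("hex", "aa"), ("rssi", "-40")]]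

def Spec_deduplicate_packets (packets : List (List (String × String))) (out : List (List (String × String))) : Prop := out = deduplicate_packets_alt packets
instance (packets : List (List (String × String))) (out : List (List (String × String))) : Decidable (Spec_deduplicate_packets packets out) := by unfold Spec_deduplicate_packets; infer_instance

-- ===== CLAIM (what is proved, stated in full; the proofs are below) =====
def Claim_equal_deduplicate_packets : Prop := ∀ (packets : List (List (String × String))), Dom_deduplicate_packets packets → Pre_deduplicate_packets packets → Spec_deduplicate_packets packets (deduplicate_packets packets)

-- ===== LEMMAS AND PROOFS =====

def pvPkey (p : List (String × String)) : String × String :=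
  (PySem.Dict.getD ⟨p⟩ "ts" "", PySem.Dict.getD ⟨p⟩ "hex" "")
def pvTs (p : List (String × String)) : String := PySem.Dict.getD ⟨p⟩ "ts" ""
def pvBf (a b : List (String × String)) : Bool := decide (pvTs a < pvTs b)

def ded (s : List (String × String)) : List (List (String × String)) → List (List (String × String))
  | [] => []
  | p :: l => if pvPkey p ∈ s then ded s l else p :: ded (pvPkey p :: s) l

theorem pvTs_eq_fst (p : List (String × String)) : pvTs p = (pvPkey p).1 := rfl

theorem ded_congr (s t : List (String × String)) (l : List (List (String × String)))
    (h : ∀ x, x ∈ s ↔ x ∈ t) : ded s l = ded t l := by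
  induction l generalizing s t with
  | nil => rfl
  | cons p l ih =>
      simp only [ded]
      by_cases hp : pvPkey p ∈ s
      · rw [if_pos hp, if_pos ((h _).mp hp), ih s t h]
      · rw [if_neg hp, if_neg (fun hc => hp ((h _).mpr hc))]
        rw [ih (pvPkey p :: s) (pvPkey p :: t) (by intro x; simp [h x])]

theorem mem_of_mem_ded (s : List (String × String)) (l : List (List (String × String)))
    (y : List (String × String)) (h : y ∈ ded s l) : y ∈ l := by
  induction l generalizing s with
  | nil => simp [ded] at h
  | cons p l ih =>
      simp only [ded] at h
      by_cases hp : pvPkey p ∈ s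
      · rw [if_pos hp] at h; exact List.mem_cons_of_mem _ (ih _ h)
      · rw [if_neg hp] at h
        rcases List.mem_cons.mp h with h | h
        · exact h ▸ List.mem_cons_self
        · exact List.mem_cons_of_mem _ (ih _ h)

theorem ded_cons_irrel (k : String × String) (s : List (String × String))
    (l : List (List (String × String))) (hk : k ∉ l.map pvPkey) :
    ded (k :: s) l = ded s l := by
  induction l generalizing s with
  | nil => rfl
  | cons p l ih =>
      have hne : pvPkey p ≠ k := by
        intro h; exact hk (by simp [← h])
      have hk' : k ∉ l.map pvPkey := by
        intro h; exact hk (by simp [h])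
      simp only [ded]
      by_cases hp : pvPkey p ∈ s
      · rw [if_pos (List.mem_cons_of_mem _ hp), if_pos hp, ih _ hk']
      · have : pvPkey p ∉ k :: s := by
          intro h; rcases List.mem_cons.mp h with h | h
          · exact hne h
          · exact hp h
        rw [if_neg this, if_neg hp]
        rw [ded_congr (pvPkey p :: k :: s) (k :: pvPkey p :: s) l (by intro x; simp; tauto),
            ih (pvPkey p :: s) hk']

theorem ded_drop (s : List (String × String)) (u v : List (List (String × String)))
    (x : List (String × String))
    (h : pvPkey x ∈ s ∨ ∃ w ∈ u, pvPkey w = pvPkey x) :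
    ded s (u ++ x :: v) = ded s (u ++ v) := by
  induction u generalizing s with
  | nil =>
      rcases h with h | ⟨w, hw, _⟩
      · simp [ded, h]
      · simp at hw
  | cons y u ih =>
      simp only [List.cons_append, ded]
      by_cases hy : pvPkey y ∈ s
      · rw [if_pos hy, if_pos hy]
        refine ih s ?_
        rcases h with h | ⟨w, hw, hkw⟩
        · exact Or.inl h
        · rcases List.mem_cons.mp hw with h' | h'
          · exact Or.inl (by rw [← hkw, h']; exact hy)
          · exact Or.inr ⟨w, h', hkw⟩
      · rw [if_neg hy, if_neg hy]
        congr 1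
        refine ih (pvPkey y :: s) ?_
        rcases h with h | ⟨w, hw, hkw⟩
        · exact Or.inl (List.mem_cons_of_mem _ h)
        · rcases List.mem_cons.mp hw with h' | h'
          · exact Or.inl (by rw [← hkw, h']; exact List.mem_cons_self)
          · exact Or.inr ⟨w, h', hkw⟩

theorem ded_append_fresh (s : List (String × String)) (u : List (List (String × String)))
    (x : List (String × String)) (hs : pvPkey x ∉ s) (hu : pvPkey x ∉ u.map pvPkey) :
    ded s (u ++ [x]) = ded s u ++ [x] := by
  induction u generalizing s with
  | nil => simp [ded, hs]
  | cons y u ih =>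
      have hne : pvPkey x ≠ pvPkey y := by intro h; exact hu (by simp [h])
      have hu' : pvPkey x ∉ u.map pvPkey := by intro h; exact hu (by simp [h])
      simp only [List.cons_append, ded]
      by_cases hy : pvPkey y ∈ s
      · rw [if_pos hy, if_pos hy, ih s hs hu']
      · rw [if_neg hy, if_neg hy, List.cons_append]
        congr 1
        refine ih _ ?_ hu'
        intro h; rcases List.mem_cons.mp h with h | h
        · exact hne h
        · exact hs h

theorem insertBy_all_before (x : List (String × String)) (l : List (List (String × String)))
    (h : ∀ y ∈ l, pvBf x y = true) :
    PySem.List.insertBy pvBf x l = x :: l := by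
  cases l with
  | nil => rfl
  | cons y l =>
      simp only [PySem.List.insertBy]
      rw [if_pos (h y (List.mem_cons_self))]

theorem ded_insert_fresh (s : List (String × String)) (u v : List (List (String × String)))
    (x : List (String × String))
    (hs : pvPkey x ∉ s) (hu : pvPkey x ∉ u.map pvPkey) (hv : pvPkey x ∉ v.map pvPkey)
    (hub : ∀ y ∈ u, pvTs y ≤ pvTs x) (hvb : ∀ y ∈ v, pvTs x < pvTs y) :
    ded s (u ++ x :: v) = PySem.List.insertBy pvBf x (ded s (u ++ v)) := by
  induction u generalizing s with
  | nil =>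
      simp only [List.nil_append, ded, if_neg hs]
      rw [ded_cons_irrel _ _ _ hv]
      rw [insertBy_all_before x (ded s v) (fun y hy => by
        simp only [pvBf, decide_eq_true_eq]
        exact hvb y (mem_of_mem_ded _ _ _ hy))]
  | cons y u ih =>
      have hne : pvPkey x ≠ pvPkey y := by intro h; exact hu (by simp [h])
      have hu' : pvPkey x ∉ u.map pvPkey := by intro h; exact hu (by simp [h])
      have hub' : ∀ z ∈ u, pvTs z ≤ pvTs x := fun z hz => hub z (List.mem_cons_of_mem _ hz)
      simp only [List.cons_append, ded]
      by_cases hy : pvPkey y ∈ s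
      · rw [if_pos hy, if_pos hy]; exact ih s hs hu' hub'
      · rw [if_neg hy, if_neg hy]
        have hbf : pvBf x y = false := by
          simp only [pvBf, decide_eq_false_iff_not, not_lt]
          exact hub y (List.mem_cons_self)
        have hs' : pvPkey x ∉ pvPkey y :: s := by
          intro h; rcases List.mem_cons.mp h with h | h
          · exact hne h
          · exact hs h
        rw [ih (pvPkey y :: s) hs' hu' hub']
        cases hded : ded (pvPkey y :: s) (u ++ v) with
        | nil => simp [PySem.List.insertBy, hbf]
        | cons z zs => simp [PySem.List.insertBy, hbf]

theorem insertBy_decomp (x : List (String × String)) (m : List (List (String × String)))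
    (hp : m.Pairwise (fun a b => pvTs a ≤ pvTs b)) :
    ∃ u v, m = u ++ v ∧ PySem.List.insertBy pvBf x m = u ++ x :: v ∧
      (∀ y ∈ u, pvTs y ≤ pvTs x) ∧ (∀ y ∈ v, pvTs x < pvTs y) := by
  induction m with
  | nil => exact ⟨[], [], rfl, rfl, by simp, by simp⟩
  | cons y m ih =>
      by_cases hb : pvBf x y = true
      · refine ⟨[], y :: m, rfl, ?_, by simp, ?_⟩
        · simp [PySem.List.insertBy, hb]
        · intro z hz
          have hxy : pvTs x < pvTs y := by simpa [pvBf] using hb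
          rcases List.mem_cons.mp hz with h | h
          · exact h ▸ hxy
          · exact lt_of_lt_of_le hxy ((List.pairwise_cons.mp hp).1 z h)
      · obtain ⟨u, v, hm, hins, hub, hvb⟩ := ih (List.pairwise_cons.mp hp).2
        refine ⟨y :: u, v, by simp [hm], ?_, ?_, hvb⟩
        · simp only [PySem.List.insertBy, hb, Bool.false_eq_true, if_false, hins, List.cons_append]
        · intro z hz
          rcases List.mem_cons.mp hz with h | h
          · subst h; simpa [pvBf, not_lt] using hb
          · exact hub z h

theorem sorted_append_singleton (l : List (List (String × String))) (x : List (String × String)) :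
    PySem.List.sorted (l ++ [x]) pvTs false = PySem.List.insertBy pvBf x (PySem.List.sorted l pvTs false) := by
  rw [PySem.List.sorted_eq_foldl_insertBy, PySem.List.sorted_eq_foldl_insertBy, List.foldl_append]
  rfl

theorem ded_sorted_comm (l : List (List (String × String))) :
    PySem.List.sorted (ded [] l) pvTs false = ded [] (PySem.List.sorted l pvTs false) := by
  induction l using List.reverseRecOn with
  | nil => rfl
  | append_singleton l x ih =>
      obtain ⟨u, v, hm, hins, hub, hvb⟩ :=
        insertBy_decomp x (PySem.List.sorted l pvTs false) (PySem.List.sorted_pairwise l pvTs)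
      rw [sorted_append_singleton, hins]
      have hperm : ((PySem.List.sorted l pvTs false).map pvPkey).Perm (l.map pvPkey) :=
        (PySem.List.sorted_perm l pvTs false).map pvPkey
      by_cases hk : pvPkey x ∈ l.map pvPkey
      · -- duplicate key: dropped on both sides
        obtain ⟨w, hw, hkw⟩ := List.exists_of_mem_map hk
        have hdl : ded [] (l ++ [x]) = ded [] l := by
          simpa using ded_drop [] l [] x (Or.inr ⟨w, hw, hkw⟩)
        rw [hdl, ih]
        have hws : w ∈ u ++ v := by
          rw [← hm]
          exact ((PySem.List.sorted_perm l pvTs false).mem_iff).mpr hw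
        have hwu : w ∈ u := by
          rcases List.mem_append.mp hws with h | h
          · exact h
          · exfalso
            have h1 : pvTs x < pvTs w := hvb w h
            have h2 : pvTs w = pvTs x := by rw [pvTs_eq_fst, pvTs_eq_fst, hkw]
            rw [h2] at h1; exact lt_irrefl _ h1
        rw [ded_drop [] u v x (Or.inr ⟨w, hwu, hkw⟩), ← hm]
      · -- fresh key
        have hk2 : pvPkey x ∉ (PySem.List.sorted l pvTs false).map pvPkey := fun h => hk (hperm.mem_iff.mp h)
        have hku : pvPkey x ∉ u.map pvPkey := fun h => hk2 (by rw [hm]; simpa using Or.inl h)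
        have hkv : pvPkey x ∉ v.map pvPkey := fun h => hk2 (by rw [hm]; simpa using Or.inr h)
        rw [ded_append_fresh [] l x (by simp) hk]
        rw [sorted_append_singleton, ih]
        rw [ded_insert_fresh [] u v x (by simp) hku hkv hub hvb, ← hm]

def pvStepA (st : PySem.Set (String × String) × List (List (String × String)))
    (pkt : List (String × String)) :
    PySem.Set (String × String) × List (List (String × String)) :=
  if !(PySem.Set.contains st.1 (pvPkey pkt)) then (PySem.Set.add st.1 (pvPkey pkt), st.2 ++ [pkt]) else st

def pvStepB (d : PySem.Dict (String × String) (List (String × String)))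
    (p : List (String × String)) : PySem.Dict (String × String) (List (String × String)) :=
  d.setdefault (pvPkey p) p

theorem loopA (l : List (List (String × String))) (s : PySem.Set (String × String))
    (acc : List (List (String × String))) :
    (List.foldl pvStepA (s, acc) l).2 = acc ++ ded s l := by
  induction l generalizing s acc with
  | nil => simp [ded]
  | cons p l ih =>
      simp only [List.foldl_cons]
      by_cases hp : pvPkey p ∈ s
      · have hc : PySem.Set.contains s (pvPkey p) = true := by
          rw [PySem.Set.contains_iff]; exact hp
        rw [show pvStepA (s, acc) p = (s, acc) from by simp [pvStepA, hp]]
        rw [ih]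
        simp [ded, hp]
      · have hc : PySem.Set.contains s (pvPkey p) = false := by
          rw [Bool.eq_false_iff, Ne, PySem.Set.contains_iff]; exact hp
        rw [show pvStepA (s, acc) p = (PySem.Set.add s (pvPkey p), acc ++ [p]) from by
          simp [pvStepA, hp]]
        rw [ih, PySem.Set.add_of_not_mem hp]
        rw [ded_congr (s ++ [pvPkey p]) (pvPkey p :: s) l (by intro x; simp; tauto)]
        simp [ded, hp]

theorem loopB (l : List (List (String × String)))
    (d : PySem.Dict (String × String) (List (String × String))) :
    (List.foldl pvStepB d l).values = d.values ++ ded d.keys l := by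
  induction l generalizing d with
  | nil => simp [ded]
  | cons p l ih =>
      simp only [List.foldl_cons]
      by_cases hc : d.contains (pvPkey p) = true
      · have hp : pvPkey p ∈ d.keys := (PySem.Dict.contains_iff_mem_keys d _).mp hc
        rw [show pvStepB d p = d from PySem.Dict.setdefault_of_contains d p hc]
        rw [ih]
        simp [ded, hp]
      · have hcf : d.contains (pvPkey p) = false := by
          rwa [Bool.eq_false_iff, Ne]
        have hp : pvPkey p ∉ d.keys := fun h =>
          hc ((PySem.Dict.contains_iff_mem_keys d _).mpr h)
        rw [show pvStepB d p = d.insert (pvPkey p) p from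
          PySem.Dict.setdefault_of_not_contains d p hcf]
        rw [ih]
        have hv : (d.insert (pvPkey p) p).values = d.values ++ [p] := by
          simp [PySem.Dict.values, PySem.Dict.items_insert_of_not_contains d p hcf]
        have hk : (d.insert (pvPkey p) p).keys = d.keys ++ [pvPkey p] :=
          PySem.Dict.keys_insert_of_not_contains d p hcf
        rw [hv, hk]
        rw [ded_congr (d.keys ++ [pvPkey p]) (pvPkey p :: d.keys) l (by intro x; simp; tauto)]
        simp [ded, hp]

theorem portA_eq (packets : List (List (String × String))) :
    deduplicate_packets packets = PySem.List.sorted (ded [] packets) pvTs false := by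
  have h : deduplicate_packets packets
      = PySem.List.sorted (List.foldl pvStepA (([] : PySem.Set (String × String)), []) packets).2 pvTs false := rfl
  rw [h, loopA]
  rfl

theorem portB_eq (packets : List (List (String × String))) :
    deduplicate_packets_alt packets = ded [] (PySem.List.sorted packets pvTs false) := by
  have h : deduplicate_packets_alt packets
      = (List.foldl pvStepB PySem.Dict.empty (PySem.List.sorted packets pvTs false)).values := rfl
  rw [h, loopB]
  rfl

-- ===== VERDICT (by name: the statement is the Claim_ definition above) =====
theorem deduplicate_packets_spec : Claim_equal_deduplicate_packets := by
  intro packets _ _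
  show deduplicate_packets packets = deduplicate_packets_alt packets
  rw [portA_eq, portB_eq, ded_sorted_comm]
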